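-- pv_equiv track=rewrite | github.com/vishrutkmr7/DailyPracticeProblemsDIP | dp08242019.py | witnesses
-- ===== SOURCE A (Python) =====
-- def witnesses(heights):
--     # Fill this in.
--     heights.reverse()
--     n = len(heights)
--     witnesses = []
--     maxL = 0
--
--     for i in range(0, n):
--         if i == 0 or (heights[i] > maxL):
--             witnesses.append(heights[i])
--             maxL = heights[i]
--
--     return len(witnesses)
-- ===== SOURCE B (Python) =====
-- def witnesses(heights):
--     heights.reverse()   # same in-place mutation as A
--     if not heights:
--         return 0
--     # full running-maximum table, then count its distinct values
--     runmax = [heights[0]]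
--     for h in heights[1:]:
--         runmax.append(h if h > runmax[-1] else runmax[-1])
--     return len(set(runmax))
-- ===== Notes on version B (the rewrite author's own statement) =====
-- stated objective: alternative
-- what changed: Instead of A's conditional append-to-a-witness-list loop measured by its length, B builds the complete running-maximum table of the reversed list and returns the number of distinct values in it (a set).
import Mathlib
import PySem

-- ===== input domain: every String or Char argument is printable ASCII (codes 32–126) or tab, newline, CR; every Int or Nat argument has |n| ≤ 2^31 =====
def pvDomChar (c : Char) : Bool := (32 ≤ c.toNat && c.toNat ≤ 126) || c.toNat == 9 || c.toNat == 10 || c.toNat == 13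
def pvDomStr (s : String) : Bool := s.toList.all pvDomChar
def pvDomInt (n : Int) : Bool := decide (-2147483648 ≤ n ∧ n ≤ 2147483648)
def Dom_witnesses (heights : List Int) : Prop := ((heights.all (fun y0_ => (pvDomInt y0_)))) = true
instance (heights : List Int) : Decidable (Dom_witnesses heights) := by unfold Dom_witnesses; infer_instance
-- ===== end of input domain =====

-- B computes the answer as the number of distinct values in the running-maximum table of the
-- reversed list, instead of A's conditional witness-list append measured by its length;
-- the RETURN value is proved equal, and B performs the same in-place reverse of its argument as A.
-- ===== PORT A =====
def witnesses (heights : List Int) : Int :=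
  let rev := heights.reverse
  let n : Int := rev.length
  let st := (PySem.List.pyRange 0 n 1).foldl
    (fun (st : List Int × Int) i =>
      if i == 0 || PySem.List.pyGetD rev i 0 > st.2 then
        (st.1 ++ [PySem.List.pyGetD rev i 0], PySem.List.pyGetD rev i 0)
      else st) ([], 0)
  st.1.length

-- ===== PORT B =====
def witnesses_alt (heights : List Int) : Int :=
  match heights.reverse with
  | [] => 0
  | h :: t =>
    let runmax := t.foldl (fun acc x =>
      acc ++ [if x > PySem.List.pyGetD acc (-1) 0 then x else PySem.List.pyGetD acc (-1) 0]) [h]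
    ((PySem.Set.ofList runmax).length : Int)

-- ===== PRECONDITION & SPEC =====
def Spec_witnesses (heights : List Int) (out : Int) : Prop := out = witnesses_alt heights
instance (heights : List Int) (out : Int) : Decidable (Spec_witnesses heights out) := by unfold Spec_witnesses; infer_instance

-- ===== CLAIM (what is proved, stated in full; the proofs are below) =====
def Claim_equal_witnesses : Prop := ∀ (heights : List Int), Dom_witnesses heights → Spec_witnesses heights (witnesses heights)

-- ===== LEMMAS AND PROOFS =====

-- number of strict right-to-left records, with current maximum m (shared reference function)
def witnessesRecords : List Int → Int → Int
  | [], _ => 0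
  | h :: t, m => if h > m then 1 + witnessesRecords t h else witnessesRecords t m

-- the running-maximum continuation of a list, starting from current maximum m
def tailMax : Int → List Int → List Int
  | _, [] => []
  | m, x :: t => (if x > m then x else m) :: tailMax (if x > m then x else m) t

-- A's fold keeps st.1.length = ws.length + number of records
theorem foldl_records (t : List Int) : ∀ (ws : List Int) (m : Int),
    ((t.foldl (fun (st : List Int × Int) h =>
        if h > st.2 then (st.1 ++ [h], h) else st) (ws, m)).1.length : Int)
      = ws.length + witnessesRecords t m := by
  induction t with
  | nil => intro ws m; simp [witnessesRecords]
  | cons h t ih =>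
    intro ws m
    simp only [List.foldl_cons, witnessesRecords]
    by_cases hm : h > m
    · simp [hm, ih]; ring
    · simp [hm, ih]

-- B's fold appends exactly the tailMax continuation
theorem foldl_runmax (t : List Int) : ∀ (p : List Int) (m : Int), p ≠ [] →
    PySem.List.pyGetD p (-1) 0 = m →
    t.foldl (fun acc x =>
        acc ++ [if x > PySem.List.pyGetD acc (-1) 0 then x else PySem.List.pyGetD acc (-1) 0]) p
      = p ++ tailMax m t := by
  induction t with
  | nil => intro p m _ _; simp [tailMax]
  | cons x t ih =>
    intro p m hne hlast
    simp only [List.foldl_cons, tailMax, hlast]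
    rw [ih (p ++ [if x > m then x else m]) (if x > m then x else m)
      (by simp) (PySem.List.pyGetD_neg_one_append_singleton ..)]
    simp

-- counting distinct values of the running-maximum table counts exactly the records
theorem set_tailMax (t : List Int) : ∀ (p : List Int) (m : Int), m ∈ p → (∀ y ∈ p, y ≤ m) →
    ((PySem.Set.ofList (p ++ tailMax m t)).length : Int)
      = (PySem.Set.ofList p).length + witnessesRecords t m := by
  induction t with
  | nil => intro p m _ _; simp [tailMax, witnessesRecords]
  | cons x t ih =>
    intro p m hmem hub
    simp only [tailMax, witnessesRecords]
    by_cases hx : x > m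
    · simp only [hx, if_pos]
      have hstep : p ++ x :: tailMax x t = (p ++ [x]) ++ tailMax x t := by simp
      rw [hstep, ih (p ++ [x]) x (by simp) (by
        intro y hy
        rcases List.mem_append.mp hy with hy | hy
        · exact le_of_lt (lt_of_le_of_lt (hub y hy) hx)
        · simp at hy; omega)]
      have hnot : x ∉ PySem.Set.ofList p := by
        rw [PySem.Set.mem_ofList]
        intro hc
        exact absurd (hub x hc) (by omega)
      rw [show PySem.Set.ofList (p ++ [x]) = PySem.Set.add (PySem.Set.ofList p) x from by
            simp [PySem.Set.ofList_eq_foldl, List.foldl_append],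
          PySem.Set.add_of_not_mem hnot]
      simp; ring
    · simp only [hx, if_false]
      have hstep : p ++ m :: tailMax m t = (p ++ [m]) ++ tailMax m t := by simp
      rw [hstep, ih (p ++ [m]) m (by simp) (by
        intro y hy
        rcases List.mem_append.mp hy with hy | hy
        · exact hub y hy
        · simp at hy; omega)]
      rw [show PySem.Set.ofList (p ++ [m]) = PySem.Set.add (PySem.Set.ofList p) m from by
            simp [PySem.Set.ofList_eq_foldl, List.foldl_append],
          PySem.Set.add_of_mem (by rw [PySem.Set.mem_ofList]; exact hmem)]

-- ===== VERDICT (by name: the statement is the Claim_ definition above) =====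
theorem witnesses_spec : Claim_equal_witnesses := by
  intro heights _
  unfold Spec_witnesses witnesses witnesses_alt
  cases hrev : heights.reverse with
  | nil => simp
  | cons h t =>
    simp only []
    -- B side: the fold builds [h] ++ tailMax h t, whose distinct count is 1 + records
    rw [foldl_runmax t [h] h (by simp)
        (by rw [show ([h] : List Int) = [] ++ [h] from rfl]
            exact PySem.List.pyGetD_neg_one_append_singleton ..),
      set_tailMax t [h] h (by simp) (by intro y hy; simp at hy; omega)]
    -- A side: peel off index 0, then fold over the tail elements
    have hn : (0 : Int) < (((h :: t) : List Int).length : Int) := by simp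
    rw [PySem.List.pyRange_one_cons hn]
    simp only [List.foldl_cons, PySem.List.pyGetD_zero_cons, beq_self_eq_true,
      Bool.true_or, if_true, List.nil_append]
    rw [PySem.List.foldl_congr_mem (g := fun (st : List Int × Int) i =>
        if PySem.List.pyGetD (h :: t) i 0 > st.2 then
          (st.1 ++ [PySem.List.pyGetD (h :: t) i 0], PySem.List.pyGetD (h :: t) i 0)
        else st)
      (h := by
        intro acc x hx
        have hx1 : 1 ≤ x := (PySem.List.mem_pyRange_one.mp hx).1
        have hne : (x == (0:Int)) = false := by
          simp only [beq_eq_false_iff_ne, ne_eq]; omega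
        rw [hne]
        simp)]
    rw [show (0:Int) + 1 = 1 from rfl]
    rw [PySem.List.foldl_pyRange_pyGetD' (h :: t) 0
      (fun (st : List Int × Int) (v : Int) =>
        if v > st.2 then (st.1 ++ [v], v) else st) ([h], h) (by omega)]
    simp only [show ((1:Int)).toNat = 1 from rfl, List.drop_succ_cons, List.drop_zero]
    rw [foldl_records]
    simp [PySem.Set.ofList]
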